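-- pv_equiv track=rewrite | github.com/liu2bao/PyPSASP | PyPSASP/utils/utils_gadgets.py | arrange_list_dict_by_keys
-- ===== SOURCE A (Python) =====
-- def arrange_list_dict_by_keys(list_dicts, list_keys, dict_translate=None):
--     num_keys = len(list_keys)
--     list_result = []
--     if isinstance(dict_translate, dict):
--         dict_translate_reverse = {v: k for k, v in dict_translate.items()}
--         keys_o_r = dict_translate_reverse.keys()
--         keys_o = dict_translate.keys()
--     else:
--         dict_translate_reverse = {}
--         keys_o_r = []
--         keys_o = []
--     for dict_t in list_dicts:
--         if isinstance(dict_t, dict):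
--             keys_dict_t = dict_t.keys()
--             result_t = []
--             for key_t in list_keys:
--                 appended = False
--                 if key_t in keys_dict_t:
--                     result_t.append(dict_t[key_t])
--                     appended = True
--                 elif key_t in keys_o:
--                     key_t_n = dict_translate[key_t]
--                     if key_t_n in keys_dict_t:
--                         result_t.append(dict_t[key_t_n])
--                         appended = True
--                 elif key_t in keys_o_r:
--                     key_t_n = dict_translate_reverse[key_t]
--                     if key_t_n in keys_dict_t:
--                         result_t.append(dict_t[key_t_n])
--                         appended = True
--                 if not appended:
--                     result_t.append(None)
--         else:
--             result_t = [None] * num_keys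
--         list_result.append(result_t)
--     return list_result
-- ===== SOURCE B (Python) =====
-- def arrange_list_dict_by_keys(list_dicts, list_keys, dict_translate=None):
--     # Column-major: build one column per requested key across all dicts,
--     # then transpose the columns into per-dict rows by index.
--     if isinstance(dict_translate, dict):
--         fwd = dict_translate
--         rev = {v: k for k, v in dict_translate.items()}
--     else:
--         fwd = {}
--         rev = {}
--     columns = []
--     for key in list_keys:
--         alt = fwd[key] if key in fwd else rev.get(key)
--         col = []
--         for d in list_dicts:
--             if not isinstance(d, dict):
--                 col.append(None)
--             elif key in d:
--                 col.append(d[key])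
--             elif alt is not None and alt in d:
--                 col.append(d[alt])
--             else:
--                 col.append(None)
--         columns.append(col)
--     return [[col[i] for col in columns] for i in range(len(list_dicts))]
-- ===== Notes on version B (the rewrite author's own statement) =====
-- stated objective: alternative
-- what changed: B traverses column-major: for each requested key it resolves its translation alternate once and builds a whole column of values across all dicts, then transposes the columns into per-dict rows by index, instead of A's row-major per-dict loop that re-resolves each key's forward/reverse translation with an 'appended' flag.
import Mathlib
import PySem

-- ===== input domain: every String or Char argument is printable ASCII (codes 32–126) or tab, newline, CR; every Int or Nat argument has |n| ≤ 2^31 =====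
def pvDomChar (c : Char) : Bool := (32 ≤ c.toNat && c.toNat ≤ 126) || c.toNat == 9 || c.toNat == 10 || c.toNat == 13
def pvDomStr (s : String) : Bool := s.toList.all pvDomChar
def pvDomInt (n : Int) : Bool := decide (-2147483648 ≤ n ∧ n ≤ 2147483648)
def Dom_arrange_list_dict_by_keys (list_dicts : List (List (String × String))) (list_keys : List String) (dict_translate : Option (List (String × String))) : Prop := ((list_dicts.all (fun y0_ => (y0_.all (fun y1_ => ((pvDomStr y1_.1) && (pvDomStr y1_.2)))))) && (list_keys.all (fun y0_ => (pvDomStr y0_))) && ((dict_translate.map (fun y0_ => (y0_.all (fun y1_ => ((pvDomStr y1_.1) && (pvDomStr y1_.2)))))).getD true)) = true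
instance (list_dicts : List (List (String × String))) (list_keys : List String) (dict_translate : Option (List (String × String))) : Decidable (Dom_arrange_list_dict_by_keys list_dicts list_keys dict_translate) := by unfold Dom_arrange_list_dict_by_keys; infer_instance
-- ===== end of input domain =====

-- B builds one column of values per requested key (resolving its translation once) and then
-- transposes the columns into per-dict rows by index; A loops row-major per dict. Same return value.

-- ===== PORT A =====
-- A's elements are dicts by type, so the isinstance branches take their dict arm.
def arrange_list_dict_by_keys (list_dicts : List (List (String × String))) (list_keys : List String) (dict_translate : Option (List (String × String))) : List (List (Option String)) :=
  let dt : PySem.Dict String String :=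
    match dict_translate with
    | some l => PySem.Dict.ofList l
    | none => PySem.Dict.empty
  let dtr : PySem.Dict String String :=
    match dict_translate with
    | some l => (PySem.Dict.ofList l).items.foldl (fun acc kv => acc.insert kv.2 kv.1) PySem.Dict.empty
    | none => PySem.Dict.empty
  list_dicts.foldl (fun list_result dict_t_l =>
    let dict_t := PySem.Dict.ofList dict_t_l
    let result_t := list_keys.foldl (fun result_t key_t =>
      if dict_t.contains key_t then
        result_t ++ [dict_t.get? key_t]
      else if dt.contains key_t then
        let key_t_n := dt.getD key_t ""
        if dict_t.contains key_t_n then result_t ++ [dict_t.get? key_t_n]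
        else result_t ++ [none]
      else if dtr.contains key_t then
        let key_t_n := dtr.getD key_t ""
        if dict_t.contains key_t_n then result_t ++ [dict_t.get? key_t_n]
        else result_t ++ [none]
      else result_t ++ [none]) ([] : List (Option String))
    list_result ++ [result_t]) []

-- ===== PORT B =====
def arrange_list_dict_by_keys_alt (list_dicts : List (List (String × String))) (list_keys : List String) (dict_translate : Option (List (String × String))) : List (List (Option String)) :=
  let fwd : PySem.Dict String String :=
    match dict_translate with
    | some l => PySem.Dict.ofList l
    | none => PySem.Dict.empty
  let rev : PySem.Dict String String :=
    match dict_translate with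
    | some l => (PySem.Dict.ofList l).items.foldl (fun acc kv => acc.insert kv.2 kv.1) PySem.Dict.empty
    | none => PySem.Dict.empty
  let columns : List (List (Option String)) := list_keys.map (fun key =>
    let alt : Option String := if fwd.contains key then some (fwd.getD key "") else rev.get? key
    list_dicts.map (fun dl =>
      let d := PySem.Dict.ofList dl
      if d.contains key then d.get? key
      else match alt with
        | some a => if d.contains a then d.get? a else none
        | none => none))
  -- col[i] is always in range here (every column has length list_dicts.length), so .getD none is exact
  (PySem.List.pyRange 0 list_dicts.length 1).map (fun i =>
    columns.map (fun col => (PySem.List.pyGet? col i).getD none))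

-- ===== PRECONDITION & SPEC =====
def Spec_arrange_list_dict_by_keys (list_dicts : List (List (String × String))) (list_keys : List String) (dict_translate : Option (List (String × String))) (out : List (List (Option String))) : Prop := out = arrange_list_dict_by_keys_alt list_dicts list_keys dict_translate
instance (list_dicts : List (List (String × String))) (list_keys : List String) (dict_translate : Option (List (String × String))) (out : List (List (Option String))) : Decidable (Spec_arrange_list_dict_by_keys list_dicts list_keys dict_translate out) := by unfold Spec_arrange_list_dict_by_keys; infer_instance

-- ===== CLAIM (what is proved, stated in full; the proofs are below) =====
def Claim_equal_arrange_list_dict_by_keys : Prop := ∀ (list_dicts : List (List (String × String))) (list_keys : List String) (dict_translate : Option (List (String × String))), Dom_arrange_list_dict_by_keys list_dicts list_keys dict_translate → Spec_arrange_list_dict_by_keys list_dicts list_keys dict_translate (arrange_list_dict_by_keys list_dicts list_keys dict_translate)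

-- ===== LEMMAS AND PROOFS =====

-- A's per-(dict,key) cell, pulled out of the branch structure.
def pvCellA (dt dtr dict_t : PySem.Dict String String) (key_t : String) : Option String :=
  if dict_t.contains key_t then dict_t.get? key_t
  else if dt.contains key_t then
    (if dict_t.contains (dt.getD key_t "") then dict_t.get? (dt.getD key_t "") else none)
  else if dtr.contains key_t then
    (if dict_t.contains (dtr.getD key_t "") then dict_t.get? (dtr.getD key_t "") else none)
  else none

-- B's per-(key,dict) cell.
def pvCellB (fwd rev d : PySem.Dict String String) (key : String) : Option String :=
  let alt : Option String := if fwd.contains key then some (fwd.getD key "") else rev.get? key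
  if d.contains key then d.get? key
  else match alt with
    | some a => if d.contains a then d.get? a else none
    | none => none

lemma inner_foldl_eq (dt dtr dict_t : PySem.Dict String String) (list_keys : List String) :
    list_keys.foldl (fun result_t key_t =>
      if dict_t.contains key_t then
        result_t ++ [dict_t.get? key_t]
      else if dt.contains key_t then
        let key_t_n := dt.getD key_t ""
        if dict_t.contains key_t_n then result_t ++ [dict_t.get? key_t_n]
        else result_t ++ [none]
      else if dtr.contains key_t then
        let key_t_n := dtr.getD key_t ""
        if dict_t.contains key_t_n then result_t ++ [dict_t.get? key_t_n]
        else result_t ++ [none]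
      else result_t ++ [none]) ([] : List (Option String))
    = list_keys.map (pvCellA dt dtr dict_t) := by
  have h := PySem.List.foldl_append_singleton_eq_map (l := list_keys)
    (f := pvCellA dt dtr dict_t) (acc := ([] : List (Option String)))
  rw [PySem.List.foldl_congr_mem (g := fun acc k => acc ++ [pvCellA dt dtr dict_t k])]
  · simpa using h
  · intro acc k _
    simp only [pvCellA]
    split_ifs <;> rfl

lemma cellA_eq_cellB (dt dtr d : PySem.Dict String String) (k : String) :
    pvCellA dt dtr d k = pvCellB dt dtr d k := by
  simp only [pvCellA, pvCellB]
  by_cases hd : d.contains k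
  · simp [hd]
  · by_cases hf : dt.contains k
    · simp [hd, hf]
    · simp only [hd, hf, Bool.false_eq_true, if_false]
      cases hr : dtr.get? k with
      | some w =>
        have hc : dtr.contains k = true := by
          rw [PySem.Dict.contains_eq_isSome_get?, hr]; rfl
        have hw : dtr.getD k "" = w := PySem.Dict.getD_of_get?_eq_some _ _ hr
        simp [hc, hw]
      | none =>
        have hc : dtr.contains k = false := by
          rw [PySem.Dict.contains_eq_isSome_get?, hr]; rfl
        simp [hc]

-- the transpose step: row i of B's column matrix is A's row for dict i
lemma transpose_eq (dt dtr : PySem.Dict String String)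
    (list_dicts : List (List (String × String))) (list_keys : List String) :
    (PySem.List.pyRange 0 list_dicts.length 1).map (fun i =>
      (list_keys.map (fun key => list_dicts.map (fun dl =>
        pvCellB dt dtr (PySem.Dict.ofList dl) key))).map
        (fun col => (PySem.List.pyGet? col i).getD none))
    = list_dicts.map (fun dl => list_keys.map (pvCellA dt dtr (PySem.Dict.ofList dl))) := by
  apply List.ext_getElem
  · simp [PySem.List.length_pyRange_one]
  · intro i h1 h2
    have hlen : (PySem.List.pyRange 0 (list_dicts.length : Int) 1).length = list_dicts.length := by
      simp [PySem.List.length_pyRange_one]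
    have hi : i < list_dicts.length := by
      simpa [hlen] using h1
    simp only [List.getElem_map, List.map_map]
    rw [PySem.List.getElem_pyRange_one]
    apply List.map_congr_left
    intro k _
    simp only [Function.comp_apply]
    have : PySem.List.pyGet? (list_dicts.map (fun dl =>
        pvCellB dt dtr (PySem.Dict.ofList dl) k)) ((0 : Int) + i)
        = some (pvCellB dt dtr (PySem.Dict.ofList list_dicts[i]) k) := by
      rw [zero_add, PySem.List.pyGet?_natCast]
      simp [hi]
    rw [this, Option.getD_some, cellA_eq_cellB]

lemma main_eq (dt dtr : PySem.Dict String String)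
    (list_dicts : List (List (String × String))) (list_keys : List String) :
    list_dicts.foldl (fun list_result dict_t_l =>
      let dict_t := PySem.Dict.ofList dict_t_l
      let result_t := list_keys.foldl (fun result_t key_t =>
        if dict_t.contains key_t then
          result_t ++ [dict_t.get? key_t]
        else if dt.contains key_t then
          let key_t_n := dt.getD key_t ""
          if dict_t.contains key_t_n then result_t ++ [dict_t.get? key_t_n]
          else result_t ++ [none]
        else if dtr.contains key_t then
          let key_t_n := dtr.getD key_t ""
          if dict_t.contains key_t_n then result_t ++ [dict_t.get? key_t_n]
          else result_t ++ [none]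
        else result_t ++ [none]) ([] : List (Option String))
      list_result ++ [result_t]) []
    = (PySem.List.pyRange 0 list_dicts.length 1).map (fun i =>
        (list_keys.map (fun key => list_dicts.map (fun dl =>
          pvCellB dt dtr (PySem.Dict.ofList dl) key))).map
          (fun col => (PySem.List.pyGet? col i).getD none)) := by
  rw [transpose_eq]
  rw [PySem.List.foldl_congr_mem
    (g := fun acc dl => acc ++ [list_keys.map (pvCellA dt dtr (PySem.Dict.ofList dl))])]
  · rw [PySem.List.foldl_append_singleton_eq_map, List.nil_append]
  · intro acc dl _
    dsimp only
    rw [inner_foldl_eq]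

-- ===== VERDICT (by name: the statement is the Claim_ definition above) =====
theorem arrange_list_dict_by_keys_spec : Claim_equal_arrange_list_dict_by_keys := by
  intro list_dicts list_keys dict_translate _
  show _ = _
  unfold arrange_list_dict_by_keys arrange_list_dict_by_keys_alt
  cases dict_translate with
  | none =>
    simp only
    exact main_eq _ _ list_dicts list_keys
  | some l =>
    simp only
    exact main_eq _ _ list_dicts list_keys
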